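-- pv_equiv track=rewrite | github.com/rektwild/offlinellm-catalog | scripts/validate_catalog.py | validate_unique_ids
-- ===== SOURCE A (Python) =====
-- from typing import Any
--
-- def validate_unique_ids(models: list[dict[str, Any]]) -> list[str]:
--     seen: set[str] = set()
--     duplicates: set[str] = set()
--
--     for model in models:
--         model_id = model.get("id")
--         if isinstance(model_id, str):
--             if model_id in seen:
--                 duplicates.add(model_id)
--             seen.add(model_id)
--
--     if not duplicates:
--         return []
--
--     return [f"Duplicate model id detected: {model_id}" for model_id in sorted(duplicates)]
-- ===== SOURCE B (Python) =====
-- def validate_unique_ids(models: list) -> list: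
--     # sort-then-scan: sort the string ids, duplicates are exactly the values with
--     # an adjacent equal neighbour; adjacent-dedup of that (still sorted) list
--     # yields the distinct duplicates already in sorted order. No sets/dicts.
--     ids = sorted(m.get("id") for m in models if isinstance(m.get("id"), str))
--     runs = [b for a, b in zip(ids, ids[1:]) if a == b]
--     dups = runs[:1] + [b for a, b in zip(runs, runs[1:]) if a != b]
--     return [f"Duplicate model id detected: {d}" for d in dups]
-- ===== Notes on version B (the rewrite author's own statement) =====
-- stated objective: alternative
-- what changed: Replaces A's hash-set duplicate detection during traversal with a sort-then-scan algorithm: sort all string ids, collect values with an adjacent equal neighbour, adjacent-dedup that sorted list; no sets and no membership tests at all.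
import Mathlib
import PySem

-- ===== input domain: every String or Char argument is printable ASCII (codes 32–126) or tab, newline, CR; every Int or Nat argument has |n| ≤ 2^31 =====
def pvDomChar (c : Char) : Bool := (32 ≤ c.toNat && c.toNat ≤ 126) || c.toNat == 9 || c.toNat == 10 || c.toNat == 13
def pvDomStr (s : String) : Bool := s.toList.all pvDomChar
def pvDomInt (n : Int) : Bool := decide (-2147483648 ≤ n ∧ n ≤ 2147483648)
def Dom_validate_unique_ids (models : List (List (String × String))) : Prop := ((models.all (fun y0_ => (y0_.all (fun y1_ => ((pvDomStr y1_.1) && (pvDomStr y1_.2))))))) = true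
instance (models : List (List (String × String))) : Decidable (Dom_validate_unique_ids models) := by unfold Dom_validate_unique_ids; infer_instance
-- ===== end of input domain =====

-- B replaces A's on-the-fly set-membership duplicate detection with a sort-then-scan
-- algorithm (sort the ids, take adjacent equal neighbours, adjacent-dedup); alternative, same result.

-- ===== PORT A =====
-- the seen/duplicates loop of A, one step per model (isinstance(model_id, str)
-- is always true here because the value type is String, so only the key test remains)
def validate_unique_ids (models : List (List (String × String))) : List String :=
  let st := models.foldl
    (fun (st : PySem.Set String × PySem.Set String) model =>
      match PySem.Dict.get? (PySem.Dict.mk model) "id" with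
      | some model_id =>
          (PySem.Set.add st.1 model_id,
           if PySem.Set.contains st.1 model_id then PySem.Set.add st.2 model_id else st.2)
      | none => st)
    (PySem.Set.empty, PySem.Set.empty)
  if st.2 = ([] : List String) then []
  else (PySem.List.sorted st.2 (fun x => x) false).map
        (fun model_id => "Duplicate model id detected: " ++ model_id)

-- ===== PORT B =====
-- [b for a, b in zip(l, l[1:]) if a == b]
def pvAdjEq (l : List String) : List String :=
  (l.zip (l.drop 1)).filterMap (fun ab => if ab.1 = ab.2 then some ab.2 else none)

-- l[:1] + [b for a, b in zip(l, l[1:]) if a != b]   (l[:1] = take 1, exact for this slice)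
def pvAdjDedup (l : List String) : List String :=
  l.take 1 ++ (l.zip (l.drop 1)).filterMap (fun ab => if ab.1 ≠ ab.2 then some ab.2 else none)

def validate_unique_ids_alt (models : List (List (String × String))) : List String :=
  let ids := PySem.List.sorted
    (models.filterMap (fun m => PySem.Dict.get? (PySem.Dict.mk m) "id")) (fun x => x) false
  let runs := pvAdjEq ids
  let dups := pvAdjDedup runs
  dups.map (fun d => "Duplicate model id detected: " ++ d)

-- ===== PRECONDITION & SPEC =====
def Spec_validate_unique_ids (models : List (List (String × String))) (out : List String) : Prop := out = validate_unique_ids_alt models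
instance (models : List (List (String × String))) (out : List String) : Decidable (Spec_validate_unique_ids models out) := by unfold Spec_validate_unique_ids; infer_instance

-- ===== CLAIM (what is proved, stated in full; the proofs are below) =====
def Claim_equal_validate_unique_ids : Prop := ∀ (models : List (List (String × String))), Dom_validate_unique_ids models → Spec_validate_unique_ids models (validate_unique_ids models)

-- ===== LEMMAS AND PROOFS =====

-- a fold over models that acts only on the looked-up ids is a fold over the id list
theorem foldl_match_filterMap {σ : Type} (g : σ → String → σ) :
    ∀ (models : List (List (String × String))) (s : σ),
      models.foldl
        (fun s model =>
          match PySem.Dict.get? (PySem.Dict.mk model) "id" with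
          | some model_id => g s model_id
          | none => s) s
      = (models.filterMap (fun m => PySem.Dict.get? (PySem.Dict.mk m) "id")).foldl g s := by
  intro models
  induction models with
  | nil => intro s; rfl
  | cons m rest ih =>
    intro s
    simp only [List.foldl_cons, List.filterMap_cons]
    cases PySem.Dict.get? (PySem.Dict.mk m) "id" with
    | none => exact ih s
    | some x => simpa using ih (g s x)

-- invariant of A's loop: the duplicates set stays nodup, stays inside seen, and its
-- membership is "already a duplicate, or seen before and recurring now, or occurs twice ahead"
theorem aLoop_invariant :
    ∀ (ids : List String) (seen D : List String),
      D.Nodup → (∀ x ∈ D, x ∈ seen) →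
      (ids.foldl
        (fun (st : PySem.Set String × PySem.Set String) model_id =>
          (PySem.Set.add st.1 model_id,
           if PySem.Set.contains st.1 model_id then PySem.Set.add st.2 model_id else st.2))
        (seen, D)).2.Nodup ∧
      (∀ x, x ∈ (ids.foldl
        (fun (st : PySem.Set String × PySem.Set String) model_id =>
          (PySem.Set.add st.1 model_id,
           if PySem.Set.contains st.1 model_id then PySem.Set.add st.2 model_id else st.2))
        (seen, D)).2 ↔
        x ∈ D ∨ (x ∈ seen ∧ x ∈ ids) ∨ (x ∉ seen ∧ 2 ≤ ids.count x)) := by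
  intro ids
  induction ids with
  | nil =>
    intro seen D hD hsub
    refine ⟨hD, fun x => ?_⟩
    simp
  | cons a rest ih =>
    intro seen D hD hsub
    simp only [List.foldl_cons]
    by_cases ha : a ∈ seen
    · have hc : PySem.Set.contains seen a = true := by
        simpa [PySem.Set.contains_iff] using ha
      have hseen : PySem.Set.add seen a = seen := PySem.Set.add_of_mem ha
      rw [hc, if_pos rfl]
      simp only [hseen]
      have hD' : (PySem.Set.add D a).Nodup := PySem.Set.nodup_add D a hD
      have hsub' : ∀ x ∈ PySem.Set.add D a, x ∈ seen := by
        intro x hx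
        rcases (PySem.Set.mem_add _ _ _).1 hx with h | h
        · exact hsub x h
        · exact h ▸ ha
      obtain ⟨hN, hM⟩ := ih seen (PySem.Set.add D a) hD' hsub'
      refine ⟨hN, fun x => ?_⟩
      rw [hM x, PySem.Set.mem_add]
      constructor
      · rintro ((h | rfl) | ⟨hs, hr⟩ | ⟨hns, hcnt⟩)
        · exact Or.inl h
        · exact Or.inr (Or.inl ⟨ha, by simp⟩)
        · exact Or.inr (Or.inl ⟨hs, List.mem_cons_of_mem _ hr⟩)
        · refine Or.inr (Or.inr ⟨hns, ?_⟩)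
          have hxa : x ≠ a := fun h => hns (h ▸ ha)
          rw [List.count_cons, if_neg (by simp [Ne.symm hxa])]
          omega
      · rintro (h | ⟨hs, hr⟩ | ⟨hns, hcnt⟩)
        · exact Or.inl (Or.inl h)
        · rcases List.mem_cons.1 hr with rfl | hr'
          · exact Or.inl (Or.inr rfl)
          · exact Or.inr (Or.inl ⟨hs, hr'⟩)
        · have hxa : x ≠ a := fun h => hns (h ▸ ha)
          refine Or.inr (Or.inr ⟨hns, ?_⟩)
          rw [List.count_cons, if_neg (by simp [Ne.symm hxa])] at hcnt
          omega
    · have hc : PySem.Set.contains seen a = false := by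
        simp [ha]
      have hseen : PySem.Set.add seen a = seen ++ [a] := PySem.Set.add_of_not_mem ha
      rw [hc, if_neg (by simp)]
      simp only [hseen]
      have hsub' : ∀ x ∈ D, x ∈ seen ++ [a] := by
        intro x hx; exact List.mem_append_left _ (hsub x hx)
      obtain ⟨hN, hM⟩ := ih (seen ++ [a]) D hD hsub'
      refine ⟨hN, fun x => ?_⟩
      rw [hM x]
      constructor
      · rintro (h | ⟨hs, hr⟩ | ⟨hns, hcnt⟩)
        · exact Or.inl h
        · rcases List.mem_append.1 hs with hs' | hs'
          · exact Or.inr (Or.inl ⟨hs', List.mem_cons_of_mem _ hr⟩)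
          · have : x = a := by simpa using hs'
            subst this
            refine Or.inr (Or.inr ⟨ha, ?_⟩)
            have h1 : 0 < rest.count x := List.count_pos_iff.2 hr
            rw [List.count_cons, if_pos (by simp)]
            omega
        · have hxa : x ≠ a := by
            intro h; exact hns (h ▸ List.mem_append_right _ (by simp))
          have hns' : x ∉ seen := fun h => hns (List.mem_append_left _ h)
          refine Or.inr (Or.inr ⟨hns', ?_⟩)
          rw [List.count_cons, if_neg (by simp [Ne.symm hxa])]
          omega
      · rintro (h | ⟨hs, hr⟩ | ⟨hns, hcnt⟩)
        · exact Or.inl h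
        · have hxa : x ≠ a := fun h => ha (h ▸ hs)
          rcases List.mem_cons.1 hr with rfl | hr'
          · exact absurd rfl hxa
          · exact Or.inr (Or.inl ⟨List.mem_append_left _ hs, hr'⟩)
        · by_cases hxa : x = a
          · subst hxa
            rw [List.count_cons, if_pos (by simp)] at hcnt
            have hr : x ∈ rest := List.count_pos_iff.1 (by omega)
            exact Or.inr (Or.inl ⟨List.mem_append_right _ (by simp), hr⟩)
          · refine Or.inr (Or.inr ⟨?_, ?_⟩)
            · intro h
              rcases List.mem_append.1 h with h' | h'
              · exact hns h'
              · exact hxa (by simpa using h')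
            · rw [List.count_cons, if_neg (by simp [Ne.symm hxa])] at hcnt
              omega

-- recursive unfoldings of the two adjacent-pair scans
theorem pvAdjEq_nil : pvAdjEq [] = [] := rfl
theorem pvAdjEq_single (a : String) : pvAdjEq [a] = [] := rfl
theorem pvAdjEq_cons_cons (a b : String) (t : List String) :
    pvAdjEq (a :: b :: t) = (if a = b then [b] else []) ++ pvAdjEq (b :: t) := by
  simp only [pvAdjEq, List.drop_succ_cons, List.drop_zero, List.zip_cons_cons, List.filterMap_cons]
  split_ifs <;> simp

-- on a sorted list, the adjacent-equal values are exactly the values of count ≥ 2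
theorem mem_pvAdjEq_iff :
    ∀ (s : List String), s.Pairwise (· ≤ ·) →
      ∀ x, x ∈ pvAdjEq s ↔ 2 ≤ s.count x := by
  intro s
  induction s with
  | nil => intro _ x; simp [pvAdjEq_nil]
  | cons a t ih =>
    intro hp x
    cases t with
    | nil =>
      simp only [pvAdjEq_single, List.not_mem_nil, false_iff, not_le, List.count_cons,
        List.count_nil]
      split <;> omega
    | cons b t' =>
      have hab : a ≤ b := (List.pairwise_cons.1 hp).1 b (by simp)
      have hp' : (b :: t').Pairwise (· ≤ ·) := (List.pairwise_cons.1 hp).2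
      rw [pvAdjEq_cons_cons, List.mem_append, ih hp' x]
      have hmem : x ∈ (if a = b then [b] else []) ↔ (a = b ∧ x = b) := by
        split_ifs with h <;> simp [h]
      rw [hmem]
      by_cases hxb : x = b
      · subst hxb
        by_cases hab' : a = x
        · subst hab'
          simp
        · have h2 : (a == x) = false := beq_eq_false_iff_ne.2 hab'
          simp [hab']
      · have hbx : (b == x) = false := beq_eq_false_iff_ne.2 (fun h => hxb h.symm)
        by_cases hxa : x = a
        · subst hxa
          have h0 : t'.count x = 0 := List.count_eq_zero.2
            (fun hmemt => hxb (le_antisymm hab ((List.pairwise_cons.1 hp').1 x hmemt)))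
          simp [List.count_cons, hbx, h0, hxb]
        · have hax : (a == x) = false := beq_eq_false_iff_ne.2 (fun h => hxa h.symm)
          simp [List.count_cons, hbx, hax, hxb]

-- the adjacent-equal list is a sublist of the tail, hence inherits sortedness
theorem pvAdjEq_sublist : ∀ (s : List String), (pvAdjEq s).Sublist (s.drop 1) := by
  intro s
  induction s with
  | nil => simp [pvAdjEq_nil]
  | cons a t ih =>
    cases t with
    | nil => simp [pvAdjEq_single]
    | cons b t' =>
      rw [pvAdjEq_cons_cons]
      simp only [List.drop_succ_cons, List.drop_zero]
      by_cases hab : a = b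
      · rw [if_pos hab]
        exact List.Sublist.cons₂ b (by simpa using ih)
      · rw [if_neg hab]
        exact List.Sublist.cons b (by simpa using ih)

theorem pvAdjEq_pairwise (s : List String) (hp : s.Pairwise (· ≤ ·)) :
    (pvAdjEq s).Pairwise (· ≤ ·) :=
  List.Pairwise.sublist (pvAdjEq_sublist s) (List.Pairwise.sublist (List.drop_sublist 1 s) hp)

-- recursive unfoldings of the dedup scan
theorem pvAdjDedup_nil : pvAdjDedup [] = [] := rfl
theorem pvAdjDedup_single (a : String) : pvAdjDedup [a] = [a] := rfl
theorem pvAdjDedup_cons_cons (a b : String) (t : List String) :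
    pvAdjDedup (a :: b :: t) =
      if a = b then pvAdjDedup (b :: t)
      else a :: pvAdjDedup (b :: t) := by
  simp only [pvAdjDedup, List.drop_succ_cons, List.drop_zero, List.zip_cons_cons,
    List.filterMap_cons, List.take_succ_cons, List.take_zero]
  by_cases hab : a = b
  · subst hab; simp
  · simp [hab]

-- adjacent dedup of a sorted list: strictly increasing, same membership
theorem pvAdjDedup_spec :
    ∀ (s : List String), s.Pairwise (· ≤ ·) →
      (pvAdjDedup s).Pairwise (· < ·) ∧ (∀ x, x ∈ pvAdjDedup s ↔ x ∈ s) := by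
  intro s
  induction s with
  | nil => intro _; simp [pvAdjDedup_nil]
  | cons a t ih =>
    intro hp
    cases t with
    | nil => simp [pvAdjDedup_single]
    | cons b t' =>
      have hab : a ≤ b := (List.pairwise_cons.1 hp).1 b (by simp)
      have hp' : (b :: t').Pairwise (· ≤ ·) := (List.pairwise_cons.1 hp).2
      obtain ⟨hPW, hM⟩ := ih hp'
      rw [pvAdjDedup_cons_cons]
      by_cases hab' : a = b
      · rw [if_pos hab']
        refine ⟨hPW, fun x => ?_⟩
        rw [hM x]
        subst hab'
        simp
      · rw [if_neg hab']
        have halt : a < b := lt_of_le_of_ne hab hab'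
        refine ⟨List.pairwise_cons.2 ⟨?_, hPW⟩, fun x => ?_⟩
        · intro y hy
          have hyb : y ∈ b :: t' := (hM y).1 hy
          rcases List.mem_cons.1 hyb with rfl | hy'
          · exact halt
          · exact lt_of_lt_of_le halt ((List.pairwise_cons.1 hp').1 y hy')
        · rw [List.mem_cons, List.mem_cons, hM x, List.mem_cons]

-- ===== VERDICT (by name: the statement is the Claim_ definition above) =====
theorem validate_unique_ids_spec : Claim_equal_validate_unique_ids := by
  unfold Claim_equal_validate_unique_ids
  intro models _
  unfold Spec_validate_unique_ids
  simp only [validate_unique_ids, validate_unique_ids_alt]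
  set l := models.filterMap (fun m => PySem.Dict.get? (PySem.Dict.mk m) "id") with hl
  rw [foldl_match_filterMap
      (fun (st : PySem.Set String × PySem.Set String) model_id =>
        (PySem.Set.add st.1 model_id,
         if PySem.Set.contains st.1 model_id then PySem.Set.add st.2 model_id else st.2))]
  -- A's duplicates set
  obtain ⟨hN, hM⟩ := aLoop_invariant l PySem.Set.empty PySem.Set.empty
    (by simp [PySem.Set.empty]) (by simp [PySem.Set.empty])
  set D := (l.foldl
    (fun (st : PySem.Set String × PySem.Set String) model_id =>
      (PySem.Set.add st.1 model_id,
       if PySem.Set.contains st.1 model_id then PySem.Set.add st.2 model_id else st.2))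
    (PySem.Set.empty, PySem.Set.empty)).2 with hDdef
  have hMem : ∀ x, x ∈ D ↔ 2 ≤ l.count x := by
    intro x
    rw [hM x]
    simp [PySem.Set.empty]
  -- B's side
  set s := PySem.List.sorted l (fun x => x) false with hs
  have hsort : s.Pairwise (· ≤ ·) := PySem.List.sorted_pairwise l (fun x => x)
  have hperm : s.Perm l := PySem.List.sorted_perm l (fun x => x) false
  have hcnt : ∀ x, s.count x = l.count x := fun x => hperm.count_eq x
  have hrunsP : (pvAdjEq s).Pairwise (· ≤ ·) := pvAdjEq_pairwise s hsort
  obtain ⟨hDPW, hDM⟩ := pvAdjDedup_spec (pvAdjEq s) hrunsP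
  have hBmem : ∀ x, x ∈ pvAdjDedup (pvAdjEq s) ↔ 2 ≤ l.count x := by
    intro x
    rw [hDM x, mem_pvAdjEq_iff s hsort x, hcnt x]
  -- the two duplicate lists are permutations of each other
  have hpermBD : (pvAdjDedup (pvAdjEq s)).Perm D := by
    rw [List.perm_ext_iff_of_nodup hDPW.nodup hN]
    intro x
    rw [hBmem x, hMem x]
  have hEq : PySem.List.sorted D (fun x => x) false = pvAdjDedup (pvAdjEq s) :=
    PySem.List.sorted_eq_of_perm_of_pairwise_lt D (pvAdjDedup (pvAdjEq s)) (fun x => x)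
      hpermBD hDPW
  by_cases hDnil : D = ([] : List String)
  · have hBnil : pvAdjDedup (pvAdjEq s) = [] := by
      have := hpermBD; rw [hDnil] at this
      exact this.eq_nil
    simp [hDnil, hBnil]
  · rw [if_neg hDnil, hEq]
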